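-- pv_equiv track=rewrite | github.com/shaf-aston/FYP-sales-training-tool | src/services/analysis_services/transcript_processor.py | _identify_training_point
-- ===== SOURCE A (Python) =====
-- from typing import Dict, List, Optional, Tuple
--
-- def _identify_training_point(text: str, speaker: str) -> Optional[Dict]:
--     """Identify training points in the conversation"""
--     text_lower = text.lower()
--
--     if 'i can understand' in text_lower or 'i see' in text_lower or 'that makes sense' in text_lower:
--         return {
--             'label': 'Acknowledge prospect\'s reasoning',
--             'description': 'Recognize why the prospect wants to take action.'
--         }
--
--     if speaker in ['Cassidy', 'Prospect'] and any(word in text_lower for word in ['procrastinate', 'not sure', 'maybe', 'i guess']):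
--         return {
--             'label': 'Identify Objection',
--             'description': 'Prospect admits potential delay if not acted on immediately.'
--         }
--
--     if speaker == 'Trainer' and any(phrase in text_lower for phrase in ['how did that feel', 'what did you notice', 'how was that']):
--         return {
--             'label': 'Reflection',
--             'description': 'Coach reviews role-play to reinforce learning.'
--         }
--
--     return None
-- ===== SOURCE B (Python) =====
-- from typing import Dict, List, Optional, Tuple
--
-- # Flat keyword -> rule-index map; rule priority is the index itself.
-- _KEYWORD_RULE = [
--     ('i can understand', 0), ('i see', 0), ('that makes sense', 0),
--     ('procrastinate', 1), ('not sure', 1), ('maybe', 1), ('i guess', 1),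
--     ('how did that feel', 2), ('what did you notice', 2), ('how was that', 2),
-- ]
--
-- _SPEAKERS = [None, ('Cassidy', 'Prospect'), ('Trainer',)]
--
-- _RESULTS = [
--     {'label': "Acknowledge prospect's reasoning",
--      'description': 'Recognize why the prospect wants to take action.'},
--     {'label': 'Identify Objection',
--      'description': 'Prospect admits potential delay if not acted on immediately.'},
--     {'label': 'Reflection',
--      'description': 'Coach reviews role-play to reinforce learning.'},
-- ]
--
-- def _identify_training_point(text: str, speaker: str) -> Optional[Dict]:
--     """Staged passes: collect every matched rule index, filter by speaker
--     eligibility, then pick the highest-priority (minimum) index."""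
--     t = text.lower()
--     hits = [r for k, r in _KEYWORD_RULE if k in t]
--     cands = [r for r in hits if _SPEAKERS[r] is None or speaker in _SPEAKERS[r]]
--     if not cands:
--         return None
--     return _RESULTS[min(cands)]
-- ===== Notes on version B (the rewrite author's own statement) =====
-- stated objective: alternative
-- what changed: Replaced the first-match if-cascade by staged passes with no short-circuit: a flat keyword-to-rule-index map is scanned to collect ALL matched rule indices, these are filtered by speaker eligibility, and the result is the minimum surviving index (priority as arithmetic min instead of control flow).
import Mathlib
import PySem

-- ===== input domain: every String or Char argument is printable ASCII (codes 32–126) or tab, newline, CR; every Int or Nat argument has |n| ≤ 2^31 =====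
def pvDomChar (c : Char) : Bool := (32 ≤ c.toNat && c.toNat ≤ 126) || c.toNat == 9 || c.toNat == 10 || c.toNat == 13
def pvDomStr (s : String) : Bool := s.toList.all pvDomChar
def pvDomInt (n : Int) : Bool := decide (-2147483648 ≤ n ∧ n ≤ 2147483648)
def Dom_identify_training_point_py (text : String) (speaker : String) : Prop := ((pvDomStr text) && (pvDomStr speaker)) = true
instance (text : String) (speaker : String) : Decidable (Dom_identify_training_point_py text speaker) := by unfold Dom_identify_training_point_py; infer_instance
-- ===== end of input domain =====

-- B replaces A's first-match if-cascade by staged passes: collect every matched rule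
-- index from a flat keyword map, filter by speaker eligibility, then take the minimum
-- index (priority as arithmetic min instead of control flow); objective: alternative.

-- ===== PORT A =====
def identify_training_point_py (text : String) (speaker : String) : Option (List (String × String)) :=
  let text_lower := PySem.Str.lower text
  if PySem.Str.isIn "i can understand" text_lower || PySem.Str.isIn "i see" text_lower
      || PySem.Str.isIn "that makes sense" text_lower then
    some [("label", "Acknowledge prospect's reasoning"),
          ("description", "Recognize why the prospect wants to take action.")]
  else if decide (speaker ∈ ["Cassidy", "Prospect"]) &&
      (["procrastinate", "not sure", "maybe", "i guess"].any (fun word => PySem.Str.isIn word text_lower)) then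
    some [("label", "Identify Objection"),
          ("description", "Prospect admits potential delay if not acted on immediately.")]
  else if (speaker == "Trainer") &&
      (["how did that feel", "what did you notice", "how was that"].any (fun phrase => PySem.Str.isIn phrase text_lower)) then
    some [("label", "Reflection"),
          ("description", "Coach reviews role-play to reinforce learning.")]
  else
    none

-- ===== PORT B =====
def pvKeywordRule : List (String × Int) :=
  [("i can understand", 0), ("i see", 0), ("that makes sense", 0),
   ("procrastinate", 1), ("not sure", 1), ("maybe", 1), ("i guess", 1),
   ("how did that feel", 2), ("what did you notice", 2), ("how was that", 2)]

def pvSpeakers : List (Option (List String)) :=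
  [none, some ["Cassidy", "Prospect"], some ["Trainer"]]

def pvResults : List (List (String × String)) :=
  [[("label", "Acknowledge prospect's reasoning"),
    ("description", "Recognize why the prospect wants to take action.")],
   [("label", "Identify Objection"),
    ("description", "Prospect admits potential delay if not acted on immediately.")],
   [("label", "Reflection"),
    ("description", "Coach reviews role-play to reinforce learning.")]]

-- staged passes 1+2 of Source B: all matched rule indices, then the speaker-eligible ones
def pvCands (t : String) (speaker : String) : List Int :=
  ((pvKeywordRule.filter (fun kr => PySem.Str.isIn kr.1 t)).map Prod.snd).filter (fun r =>
    match PySem.List.pyGet? pvSpeakers r with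
    | some none => true
    | some (some sps) => decide (speaker ∈ sps)
    | none => false)

def identify_training_point_py_alt (text : String) (speaker : String) : Option (List (String × String)) :=
  let t := PySem.Str.lower text
  let cands := pvCands t speaker
  match PySem.List.min? cands (fun x => x) with
  | none => none
  | some m =>
    match PySem.List.pyGet? pvResults m with
    | some d => some d
    | none => none

-- ===== PRECONDITION & SPEC =====
def Spec_identify_training_point_py (text : String) (speaker : String) (out : Option (List (String × String))) : Prop := out = identify_training_point_py_alt text speaker
instance (text : String) (speaker : String) (out : Option (List (String × String))) : Decidable (Spec_identify_training_point_py text speaker out) := by unfold Spec_identify_training_point_py; infer_instance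

-- ===== CLAIM =====
def Claim_equal_identify_training_point_py : Prop := ∀ (text : String) (speaker : String), Dom_identify_training_point_py text speaker → Spec_identify_training_point_py text speaker (identify_training_point_py text speaker)

-- ===== LEMMAS AND PROOFS =====

-- membership in Source B's filtered candidate list, characterized per rule index
theorem pvCands_mem (t speaker : String) (r : Int) :
    r ∈ pvCands t speaker ↔
      (r = 0 ∧ (PySem.Str.isIn "i can understand" t = true ∨ PySem.Str.isIn "i see" t = true
                 ∨ PySem.Str.isIn "that makes sense" t = true))
      ∨ (r = 1 ∧ (speaker = "Cassidy" ∨ speaker = "Prospect")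
           ∧ (PySem.Str.isIn "procrastinate" t = true ∨ PySem.Str.isIn "not sure" t = true
               ∨ PySem.Str.isIn "maybe" t = true ∨ PySem.Str.isIn "i guess" t = true))
      ∨ (r = 2 ∧ speaker = "Trainer"
           ∧ (PySem.Str.isIn "how did that feel" t = true ∨ PySem.Str.isIn "what did you notice" t = true
               ∨ PySem.Str.isIn "how was that" t = true)) := by
  simp only [pvCands, pvKeywordRule, pvSpeakers, List.mem_filter, List.mem_map]
  constructor
  · rintro ⟨⟨a, ⟨ha, hain⟩, ha2⟩, hsp⟩
    simp only [List.mem_cons, List.not_mem_nil, or_false] at ha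
    rcases ha with h|h|h|h|h|h|h|h|h|h <;> subst h <;>
      simp only [] at hain ha2 <;> subst ha2 <;>
      simp_all [PySem.List.pyGet?, PySem.List.pyIdx?]
  · rintro (⟨hr, hin⟩ | ⟨hr, hs, hin⟩ | ⟨hr, hs, hin⟩) <;> subst hr
    · refine ⟨?_, by simp [PySem.List.pyGet?, PySem.List.pyIdx?]⟩
      rcases hin with h|h|h
      · exact ⟨("i can understand", 0), ⟨by simp, h⟩, rfl⟩
      · exact ⟨("i see", 0), ⟨by simp, h⟩, rfl⟩
      · exact ⟨("that makes sense", 0), ⟨by simp, h⟩, rfl⟩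
    · refine ⟨?_, by simp [PySem.List.pyGet?, PySem.List.pyIdx?]; tauto⟩
      rcases hin with h|h|h|h
      · exact ⟨("procrastinate", 1), ⟨by simp, h⟩, rfl⟩
      · exact ⟨("not sure", 1), ⟨by simp, h⟩, rfl⟩
      · exact ⟨("maybe", 1), ⟨by simp, h⟩, rfl⟩
      · exact ⟨("i guess", 1), ⟨by simp, h⟩, rfl⟩
    · refine ⟨?_, by simp [PySem.List.pyGet?, PySem.List.pyIdx?, hs]⟩
      rcases hin with h|h|h
      · exact ⟨("how did that feel", 2), ⟨by simp, h⟩, rfl⟩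
      · exact ⟨("what did you notice", 2), ⟨by simp, h⟩, rfl⟩
      · exact ⟨("how was that", 2), ⟨by simp, h⟩, rfl⟩

-- if some index is in the candidate list and every member is ≥ that index, min? picks it
theorem pvMin_eq (t speaker : String) (j : Int) (hj : j ∈ pvCands t speaker)
    (hlow : ∀ x ∈ pvCands t speaker, j ≤ x) :
    PySem.List.min? (pvCands t speaker) (fun x => x) = some j := by
  cases hmin : PySem.List.min? (pvCands t speaker) (fun x => x) with
  | none =>
    rw [PySem.List.min?_eq_none_iff] at hmin
    rw [hmin] at hj; exact absurd hj (List.not_mem_nil)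
  | some m =>
    have hmem := PySem.List.min?_mem hmin
    have hle : m ≤ j := PySem.List.min?_isMin hmin j hj
    have : m = j := le_antisymm hle (hlow m hmem)
    rw [this]

-- B reduced to the same cascade as A
theorem altB (text speaker : String) :
    identify_training_point_py text speaker = identify_training_point_py_alt text speaker := by
  simp only [identify_training_point_py, identify_training_point_py_alt]
  by_cases hb0 : (PySem.Str.isIn "i can understand" (PySem.Str.lower text)
      || PySem.Str.isIn "i see" (PySem.Str.lower text)
      || PySem.Str.isIn "that makes sense" (PySem.Str.lower text)) = true
  · have hP0 : PySem.Str.isIn "i can understand" (PySem.Str.lower text) = true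
        ∨ PySem.Str.isIn "i see" (PySem.Str.lower text) = true
        ∨ PySem.Str.isIn "that makes sense" (PySem.Str.lower text) = true := by
      simp only [Bool.or_eq_true] at hb0; exact or_assoc.mp hb0
    have h0 : (0:Int) ∈ pvCands (PySem.Str.lower text) speaker :=
      (pvCands_mem _ _ _).mpr (Or.inl ⟨rfl, hP0⟩)
    have hmin := pvMin_eq (PySem.Str.lower text) speaker 0 h0 (by
      intro x hx
      rcases (pvCands_mem _ _ _).mp hx with ⟨h, _⟩|⟨h, _⟩|⟨h, _⟩ <;> omega)
    rw [hmin, hb0]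
    rfl
  · rw [Bool.not_eq_true] at hb0
    have hq0 : ¬ (PySem.Str.isIn "i can understand" (PySem.Str.lower text) = true
        ∨ PySem.Str.isIn "i see" (PySem.Str.lower text) = true
        ∨ PySem.Str.isIn "that makes sense" (PySem.Str.lower text) = true) := by
      simp only [Bool.or_eq_false_iff] at hb0
      rintro (h|h|h)
      · exact Bool.false_ne_true (hb0.1.1.symm.trans h)
      · exact Bool.false_ne_true (hb0.1.2.symm.trans h)
      · exact Bool.false_ne_true (hb0.2.symm.trans h)
    by_cases hb1 : (decide (speaker ∈ ["Cassidy", "Prospect"]) &&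
        (["procrastinate", "not sure", "maybe", "i guess"].any
          (fun word => PySem.Str.isIn word (PySem.Str.lower text)))) = true
    · have hP1 : (speaker = "Cassidy" ∨ speaker = "Prospect")
          ∧ (PySem.Str.isIn "procrastinate" (PySem.Str.lower text) = true
              ∨ PySem.Str.isIn "not sure" (PySem.Str.lower text) = true
              ∨ PySem.Str.isIn "maybe" (PySem.Str.lower text) = true
              ∨ PySem.Str.isIn "i guess" (PySem.Str.lower text) = true) := by
        simp only [Bool.and_eq_true, decide_eq_true_eq, List.mem_cons, List.not_mem_nil,
          or_false, List.any_cons, List.any_nil, Bool.or_false, Bool.or_eq_true] at hb1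
        exact hb1
      have h1 : (1:Int) ∈ pvCands (PySem.Str.lower text) speaker :=
        (pvCands_mem _ _ _).mpr (Or.inr (Or.inl ⟨rfl, hP1.1, hP1.2⟩))
      have hmin := pvMin_eq (PySem.Str.lower text) speaker 1 h1 (by
        intro x hx
        rcases (pvCands_mem _ _ _).mp hx with ⟨h, hc⟩|⟨h, _⟩|⟨h, _⟩
        · exact absurd hc hq0
        · omega
        · omega)
      rw [hmin, hb0, hb1]
      rfl
    · rw [Bool.not_eq_true] at hb1
      have hq1 : ¬ ((speaker = "Cassidy" ∨ speaker = "Prospect")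
          ∧ (PySem.Str.isIn "procrastinate" (PySem.Str.lower text) = true
              ∨ PySem.Str.isIn "not sure" (PySem.Str.lower text) = true
              ∨ PySem.Str.isIn "maybe" (PySem.Str.lower text) = true
              ∨ PySem.Str.isIn "i guess" (PySem.Str.lower text) = true)) := by
        intro ⟨hs, hc⟩
        have : (decide (speaker ∈ ["Cassidy", "Prospect"]) &&
            (["procrastinate", "not sure", "maybe", "i guess"].any
              (fun word => PySem.Str.isIn word (PySem.Str.lower text)))) = true := by
          simp only [Bool.and_eq_true, decide_eq_true_eq, List.mem_cons, List.not_mem_nil,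
            or_false, List.any_cons, List.any_nil, Bool.or_false, Bool.or_eq_true]
          exact ⟨hs, hc⟩
        rw [hb1] at this; exact Bool.false_ne_true this
      by_cases hb2 : ((speaker == "Trainer") &&
          (["how did that feel", "what did you notice", "how was that"].any
            (fun phrase => PySem.Str.isIn phrase (PySem.Str.lower text)))) = true
      · have hP2 : speaker = "Trainer"
            ∧ (PySem.Str.isIn "how did that feel" (PySem.Str.lower text) = true
                ∨ PySem.Str.isIn "what did you notice" (PySem.Str.lower text) = true
                ∨ PySem.Str.isIn "how was that" (PySem.Str.lower text) = true) := by
          simp only [Bool.and_eq_true, beq_iff_eq, List.any_cons, List.any_nil,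
            Bool.or_false, Bool.or_eq_true] at hb2
          exact hb2
        have h2 : (2:Int) ∈ pvCands (PySem.Str.lower text) speaker :=
          (pvCands_mem _ _ _).mpr (Or.inr (Or.inr ⟨rfl, hP2.1, hP2.2⟩))
        have hmin := pvMin_eq (PySem.Str.lower text) speaker 2 h2 (by
          intro x hx
          rcases (pvCands_mem _ _ _).mp hx with ⟨h, hc⟩|⟨h, hc⟩|⟨h, _⟩
          · exact absurd hc hq0
          · exact absurd hc hq1
          · omega)
        rw [hmin, hb0, hb1, hb2]
        rfl
      · rw [Bool.not_eq_true] at hb2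
        have hq2 : ¬ (speaker = "Trainer"
            ∧ (PySem.Str.isIn "how did that feel" (PySem.Str.lower text) = true
                ∨ PySem.Str.isIn "what did you notice" (PySem.Str.lower text) = true
                ∨ PySem.Str.isIn "how was that" (PySem.Str.lower text) = true)) := by
          intro ⟨hs, hc⟩
          have : ((speaker == "Trainer") &&
              (["how did that feel", "what did you notice", "how was that"].any
                (fun phrase => PySem.Str.isIn phrase (PySem.Str.lower text)))) = true := by
            simp only [Bool.and_eq_true, beq_iff_eq, List.any_cons, List.any_nil,
              Bool.or_false, Bool.or_eq_true]
            exact ⟨hs, hc⟩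
          rw [hb2] at this; exact Bool.false_ne_true this
        have hnil : pvCands (PySem.Str.lower text) speaker = [] := by
          rw [List.eq_nil_iff_forall_not_mem]
          intro x hx
          rcases (pvCands_mem _ _ _).mp hx with ⟨_, hc⟩|⟨_, hc1, hc2⟩|⟨_, hc1, hc2⟩
          · exact hq0 hc
          · exact hq1 ⟨hc1, hc2⟩
          · exact hq2 ⟨hc1, hc2⟩
        have hmin : PySem.List.min? (pvCands (PySem.Str.lower text) speaker) (fun x => x) = none := by
          rw [PySem.List.min?_eq_none_iff]; exact hnil
        rw [hmin, hb0, hb1, hb2]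
        rfl

-- ===== VERDICT =====
theorem identify_training_point_py_spec : Claim_equal_identify_training_point_py := by
  intro text speaker _
  exact altB text speaker
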